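-- pv_equiv track=rewrite | github.com/ormai/notes | fondamenti-di-programmazione-1/domjudge/R4.py | findAndReplaceOccurrences
-- ===== SOURCE A (Python) =====
-- def findAndReplaceOccurrences(X, L, pos):
--
--     if pos == len(L):
--         return 0
--
--     bit = findAndReplaceOccurrences(X, L, pos + 1)
--     if L[pos] == X:
--         L[pos] = 0
--         return bit + 1
--     else:
--         return bit
-- ===== SOURCE B (Python) =====
-- def findAndReplaceOccurrences(X, L, pos):
--     count = 0
--     for i in range(pos, len(L)):
--         if L[i] == X:
--             L[i] = 0
--             count += 1
--     return count
-- ===== Notes on version B (the rewrite author's own statement) =====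
-- stated objective: simpler
-- what changed: Replaces the recursion (one stack frame per remaining element, elements checked right-to-left while unwinding) with a single flat range-based forward loop and a counter.
import Mathlib
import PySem

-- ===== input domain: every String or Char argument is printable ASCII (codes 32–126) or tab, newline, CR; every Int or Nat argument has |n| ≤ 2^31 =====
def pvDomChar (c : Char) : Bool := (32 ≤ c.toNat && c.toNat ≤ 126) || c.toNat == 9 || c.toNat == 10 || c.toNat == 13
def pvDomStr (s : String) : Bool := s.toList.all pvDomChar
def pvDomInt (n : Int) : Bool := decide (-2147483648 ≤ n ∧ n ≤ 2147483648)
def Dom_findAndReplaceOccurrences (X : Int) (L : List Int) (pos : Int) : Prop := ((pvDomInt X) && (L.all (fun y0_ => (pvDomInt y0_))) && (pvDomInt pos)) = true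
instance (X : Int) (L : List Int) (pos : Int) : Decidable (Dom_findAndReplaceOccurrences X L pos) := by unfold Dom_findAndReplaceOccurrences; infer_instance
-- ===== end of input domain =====

-- B replaces A's recursion (counting during the unwinding) by a single flat forward loop with a counter;
-- both Pythons mutate L in place identically (occurrences of X are set to 0); the equivalence proved here is about the RETURN value.

-- ===== PORT A =====
-- A's recursion runs pos, pos+1, … up to len(L); the Nat argument is fuel making it total
-- (inside Pre_ the fuel suffices; for pos > len(L) Python diverges, fuel 0 is unreachable inside Pre_).
def pvGoA (X : Int) (L : List Int) : Int → Nat → Int × List Int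
  | _, 0 => (0, L)
  | pos, fuel+1 =>
    if pos = (L.length : Int) then (0, L)
    else
      let r := pvGoA X L (pos + 1) fuel   -- bit = findAndReplaceOccurrences(X, L, pos + 1), with the mutated list threaded back
      match PySem.List.pyGet? r.2 pos with   -- L[pos]
      | some v => if v = X then (r.1 + 1, PySem.List.pySetD r.2 pos 0) else r   -- L[pos] = 0; return bit + 1 / return bit
      | none => r   -- IndexError (pos < -len(L)); unreachable inside Pre_

def findAndReplaceOccurrences (X : Int) (L : List Int) (pos : Int) : Int :=
  (pvGoA X L pos ((L.length - pos).toNat + 1)).1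

-- ===== PORT B =====
def pvStepB (X : Int) (acc : Int × List Int) (i : Int) : Int × List Int :=
  match PySem.List.pyGet? acc.2 i with   -- L[i]
  | some v => if v = X then (acc.1 + 1, PySem.List.pySetD acc.2 i 0) else acc   -- L[i] = 0; count += 1
  | none => acc   -- IndexError; unreachable inside Pre_

def findAndReplaceOccurrences_alt (X : Int) (L : List Int) (pos : Int) : Int :=
  ((PySem.List.pyRange pos (L.length : Int) 1).foldl (pvStepB X) (0, L)).1

-- ===== PRECONDITION & SPEC =====
-- Pre_ is exactly where the Python A returns: for pos > len(L) A never reaches its base case (RecursionError),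
-- for pos < -len(L) it hits an IndexError at L[pos]; negative pos with -len(L) ≤ pos (Python wraparound) is included.
def Pre_findAndReplaceOccurrences (X : Int) (L : List Int) (pos : Int) : Prop :=
  -(L.length : Int) ≤ pos ∧ pos ≤ (L.length : Int)
instance (X : Int) (L : List Int) (pos : Int) : Decidable (Pre_findAndReplaceOccurrences X L pos) := by unfold Pre_findAndReplaceOccurrences; infer_instance
def pvWitness_findAndReplaceOccurrences : Int × List Int × Int := (1, [1, 2, 1], 0)

def Spec_findAndReplaceOccurrences (X : Int) (L : List Int) (pos : Int) (out : Int) : Prop := out = findAndReplaceOccurrences_alt X L pos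
instance (X : Int) (L : List Int) (pos : Int) (out : Int) : Decidable (Spec_findAndReplaceOccurrences X L pos out) := by unfold Spec_findAndReplaceOccurrences; infer_instance

-- ===== CLAIM (what is proved, stated in full; the proofs are below) =====
def Claim_equal_findAndReplaceOccurrences : Prop := ∀ (X : Int) (L : List Int) (pos : Int), Dom_findAndReplaceOccurrences X L pos → Pre_findAndReplaceOccurrences X L pos → Spec_findAndReplaceOccurrences X L pos (findAndReplaceOccurrences X L pos)

-- ===== LEMMAS AND PROOFS =====

-- the list after zeroing every occurrence of X
def pvZero (X : Int) (l : List Int) : List Int := l.map (fun v => if v = X then 0 else v)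

lemma pvZero_nil (X : Int) : pvZero X [] = [] := rfl

lemma pvZero_cons (X a : Int) (l : List Int) :
    pvZero X (a :: l) = (if a = X then 0 else a) :: pvZero X l := rfl

lemma pvZero_length (X : Int) (l : List Int) : (pvZero X l).length = l.length := by
  simp [pvZero]

lemma pvZero_drop (X : Int) (l : List Int) (n : Nat) :
    (pvZero X l).drop n = pvZero X (l.drop n) := by
  simp [pvZero, List.map_drop]

-- setting position (length pre) of pre ++ y :: ys
lemma pvSetMid (pre : List Int) (y v : Int) (ys : List Int) :
    (pre ++ y :: ys).set pre.length v = pre ++ v :: ys := by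
  induction pre with
  | nil => rfl
  | cons a t ih => simp [ih]

-- negative-index assignment: L[-k] = v  is  set (len - k)
lemma pvSetD_neg (l : List Int) (k : Nat) (v : Int) (h0 : 0 < k) (h1 : k ≤ l.length) :
    PySem.List.pySetD l (-(k : Int)) v = l.set (l.length - k) v := by
  have hneg : ¬ (0 ≤ -(k : Int)) := by omega
  have hge : -(l.length : Int) ≤ -(k : Int) := by omega
  simp only [PySem.List.pySetD, PySem.List.pySet?, PySem.List.pyIdx?, if_neg hneg, if_pos hge]
  simp

-- decompose take (p+1)
lemma pvTakeSucc (l : List Int) (p : Nat) (h : p < l.length) :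
    l.take (p + 1) = l.take p ++ [l[p]] := by
  rw [List.take_add_one, List.getElem?_eq_getElem h]
  rfl

-- characterisation of A's recursion for 0 ≤ pos ≤ len
lemma pvGoA_nonneg (X : Int) (L : List Int) :
    ∀ (fuel : Nat) (pos : Int), 0 ≤ pos → pos ≤ (L.length : Int) → (L.length - pos).toNat < fuel →
      pvGoA X L pos fuel =
        ((List.count X (L.drop pos.toNat) : Int), L.take pos.toNat ++ pvZero X (L.drop pos.toNat)) := by
  intro fuel
  induction fuel with
  | zero => intro pos _ _ hf; omega
  | succ f ih =>
    intro pos h0 h1 hf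
    by_cases hp : pos = (L.length : Int)
    · simp [pvGoA, hp, pvZero_nil]
    · have hlt : pos < (L.length : Int) := lt_of_le_of_ne h1 hp
      have hplen : pos.toNat < L.length := by omega
      have hp1 : (pos + 1).toNat = pos.toNat + 1 := by omega
      have hr := ih (pos + 1) (by omega) (by omega) (by omega)
      set p := pos.toNat with hpdef
      have hpos : pos = (p : Int) := by omega
      have hdropp : L.drop p = L[p] :: L.drop (p + 1) := List.drop_eq_getElem_cons hplen
      have htp : (L.take p).length = p := by simp; omega
      -- the list returned by the recursive call, reshaped around index p
      have hr2 : L.take (p + 1) ++ pvZero X (L.drop (p + 1))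
          = L.take p ++ L[p] :: pvZero X (L.drop (p + 1)) := by
        rw [pvTakeSucc L p hplen, List.append_assoc]
        rfl
      simp only [pvGoA, if_neg hp]
      rw [hr, hp1, hr2]
      have hget : PySem.List.pyGet? (L.take p ++ L[p] :: pvZero X (L.drop (p + 1))) pos
          = some L[p] := by
        have h := PySem.List.pyGet?_append_length (L.take p) (pvZero X (L.drop (p + 1))) L[p]
        rw [htp] at h
        rw [hpos]
        exact h
      rw [hget]
      by_cases hx : L[p] = X
      · simp only [if_pos hx]
        have hset : (L.take p ++ L[p] :: pvZero X (L.drop (p + 1))).set p 0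
            = L.take p ++ 0 :: pvZero X (L.drop (p + 1)) := by
          have h := pvSetMid (L.take p) L[p] 0 (pvZero X (L.drop (p + 1)))
          rwa [htp] at h
        rw [hpos, PySem.List.pySetD_natCast, hset]
        rw [hdropp, pvZero_cons, if_pos hx, List.count_cons]
        simp [hx]
      · simp only [if_neg hx]
        rw [hdropp, pvZero_cons, if_neg hx, List.count_cons]
        simp [hx]

-- characterisation of A's recursion for pos = -k, 0 ≤ k ≤ len (Python wraparound phase)
lemma pvGoA_neg (X : Int) (L : List Int) :
    ∀ (k : Nat) (fuel : Nat), k ≤ L.length → L.length + k < fuel →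
      pvGoA X L (-(k : Int)) fuel =
        ((List.count X L : Int) + (List.count X ((pvZero X L).drop (L.length - k)) : Int),
         pvZero X L) := by
  intro k
  induction k with
  | zero =>
    intro fuel _ hf
    have h := pvGoA_nonneg X L fuel 0 (by omega) (by omega) (by omega)
    simp only [Int.natCast_zero, neg_zero] at *
    rw [h]
    have hd : (pvZero X L).drop L.length = [] := by
      rw [pvZero_drop, List.drop_length, pvZero_nil]
    simp [hd]
  | succ k ih =>
    intro fuel hk hf
    obtain ⟨f, rfl⟩ : ∃ f, fuel = f + 1 := ⟨fuel - 1, by omega⟩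
    have hp : -((k + 1 : Nat) : Int) ≠ (L.length : Int) := by push_cast; omega
    have hstep : -((k + 1 : Nat) : Int) + 1 = -(k : Int) := by push_cast; ring
    have hr := ih f (by omega) (by omega)
    simp only [pvGoA, if_neg hp, hstep, hr]
    set F := pvZero X L with hF
    have hFlen : F.length = L.length := pvZero_length X L
    set j := L.length - (k + 1) with hj
    have hjlt : j < F.length := by omega
    have hget : PySem.List.pyGet? F (-((k + 1 : Nat) : Int)) = some F[j] := by
      rw [PySem.List.pyGet?_neg_natCast F (k + 1) (by omega) (by omega)]
      rw [hFlen]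
      exact List.getElem?_eq_getElem (by omega)
    rw [hget]
    have hdropj : F.drop j = F[j] :: F.drop (j + 1) := List.drop_eq_getElem_cons hjlt
    have hj1 : j + 1 = L.length - k := by omega
    by_cases hx : F[j] = X
    · -- the branch can only fire on an element that is already 0 (X = 0 here), so the set is a no-op
      have hF0 : F[j] = (0 : Int) := by
        have : F[j] = if L[j]'(by omega) = X then 0 else L[j]'(by omega) := by
          simp [hF, pvZero]
        by_cases hLj : L[j]'(by omega) = X
        · rw [this, if_pos hLj]
        · rw [this, if_neg hLj] at hx; exact absurd hx hLj
      simp only [if_pos hx]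
      rw [pvSetD_neg F (k + 1) 0 (by omega) (by omega), hFlen, ← hj]
      rw [← hF0, List.set_getElem_self]
      rw [hdropj, List.count_cons, hj1]
      simp [hx]
      ring
    · simp only [if_neg hx]
      rw [hdropj, List.count_cons, hj1]
      simp [hx]

-- characterisation of B's loop over range(pos, len) for 0 ≤ pos ≤ len
lemma pvFoldB_nonneg (X : Int) :
    ∀ (n : Nat) (l : List Int) (pos c : Int), 0 ≤ pos → pos ≤ (l.length : Int) →
      ((l.length : Int) - pos).toNat = n →
      (PySem.List.pyRange pos (l.length : Int) 1).foldl (pvStepB X) (c, l) =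
        (c + (List.count X (l.drop pos.toNat) : Int), l.take pos.toNat ++ pvZero X (l.drop pos.toNat)) := by
  intro n
  induction n with
  | zero =>
    intro l pos c h0 h1 hn
    have hpl : pos = (l.length : Int) := by omega
    have : pos.toNat = l.length := by omega
    rw [PySem.List.pyRange_one_eq_nil (by omega)]
    simp [this, pvZero_nil]
  | succ n ih =>
    intro l pos c h0 h1 hn
    have hlt : pos < (l.length : Int) := by omega
    have hplen : pos.toNat < l.length := by omega
    set p := pos.toNat with hpdef
    have hpos : pos = (p : Int) := by omega
    have hdropp : l.drop p = l[p] :: l.drop (p + 1) := List.drop_eq_getElem_cons hplen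
    rw [PySem.List.pyRange_one_cons hlt]
    simp only [List.foldl_cons]
    have hget : PySem.List.pyGet? l pos = some l[p] :=
      PySem.List.pyGet?_eq_some_getElem l h0 hlt
    by_cases hx : l[p] = X
    · have hstep : pvStepB X (c, l) pos = (c + 1, l.set p 0) := by
        simp only [pvStepB, hget, if_pos hx]
        rw [hpos, PySem.List.pySetD_natCast]
      rw [hstep]
      set l' := l.set p 0 with hl'
      have hlen' : l'.length = l.length := by simp [hl']
      have hr := ih l' (pos + 1) (c + 1) (by omega) (by rw [hlen']; omega) (by rw [hlen']; omega)
      rw [hlen'] at hr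
      rw [hr]
      have hp1 : (pos + 1).toNat = p + 1 := by omega
      have hdrop' : l'.drop (p + 1) = l.drop (p + 1) := List.drop_set_of_lt (by omega)
      have htake' : l'.take (p + 1) = l.take p ++ [0] := by
        rw [hl', List.set_eq_take_append_cons_drop, if_pos hplen]
        have htp : (l.take p).length = p := by simp; omega
        have h1 : List.take (p + 1) (l.take p) = l.take p :=
          List.take_of_length_le (by rw [htp]; omega)
        have h2 : p + 1 - (l.take p).length = 1 := by rw [htp]; omega
        rw [List.take_append, h1, h2]
        simp
      rw [hp1, hdrop', htake', hdropp, pvZero_cons, if_pos hx, List.count_cons]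
      simp only [Prod.mk.injEq, List.append_assoc, List.singleton_append]
      refine ⟨?_, trivial⟩
      simp [hx]
      ring
    · have hstep : pvStepB X (c, l) pos = (c, l) := by
        simp only [pvStepB, hget, if_neg hx]
      rw [hstep]
      have hr := ih l (pos + 1) c (by omega) (by omega) (by omega)
      rw [hr]
      have hp1 : (pos + 1).toNat = p + 1 := by omega
      rw [hp1, hdropp, pvZero_cons, if_neg hx, List.count_cons, pvTakeSucc l p hplen]
      simp only [Prod.mk.injEq, List.append_assoc, List.singleton_append]
      refine ⟨?_, trivial⟩
      simp [hx]

-- characterisation of B's loop over the negative indices range(-k, 0)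
lemma pvFoldB_neg (X : Int) :
    ∀ (k : Nat) (l : List Int) (c : Int), k ≤ l.length →
      (PySem.List.pyRange (-(k : Int)) 0 1).foldl (pvStepB X) (c, l) =
        (c + (List.count X (l.drop (l.length - k)) : Int),
         l.take (l.length - k) ++ pvZero X (l.drop (l.length - k))) := by
  intro k
  induction k with
  | zero =>
    intro l c _
    rw [show -((0 : Nat) : Int) = 0 by simp, PySem.List.pyRange_one_eq_nil (by omega)]
    simp [pvZero_nil]
  | succ k ih =>
    intro l c hk
    have hlt : -((k + 1 : Nat) : Int) < 0 := by push_cast; omega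
    have hstep1 : -((k + 1 : Nat) : Int) + 1 = -(k : Int) := by push_cast; ring
    rw [PySem.List.pyRange_one_cons hlt]
    simp only [List.foldl_cons, hstep1]
    set j := l.length - (k + 1) with hj
    have hjlt : j < l.length := by omega
    have hget : PySem.List.pyGet? l (-((k + 1 : Nat) : Int)) = some l[j] := by
      rw [PySem.List.pyGet?_neg_natCast l (k + 1) (by omega) (by omega)]
      exact List.getElem?_eq_getElem (by omega)
    have hdropj : l.drop j = l[j] :: l.drop (j + 1) := List.drop_eq_getElem_cons hjlt
    have hj1 : j + 1 = l.length - k := by omega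
    by_cases hx : l[j] = X
    · have hstep : pvStepB X (c, l) (-((k + 1 : Nat) : Int)) = (c + 1, l.set j 0) := by
        simp only [pvStepB, hget, if_pos hx]
        rw [pvSetD_neg l (k + 1) 0 (by omega) (by omega), ← hj]
      rw [hstep]
      set l' := l.set j 0 with hl'
      have hlen' : l'.length = l.length := by simp [hl']
      have hr := ih l' (c + 1) (by rw [hlen']; omega)
      rw [hr, hlen']
      have hdrop' : l'.drop (l.length - k) = l.drop (l.length - k) :=
        List.drop_set_of_lt (by omega)
      have htake' : l'.take (l.length - k) = l.take j ++ [0] := by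
        rw [hl', List.set_eq_take_append_cons_drop, if_pos hjlt]
        have htp : (l.take j).length = j := by simp; omega
        have h1 : List.take (l.length - k) (l.take j) = l.take j :=
          List.take_of_length_le (by rw [htp]; omega)
        have h2 : l.length - k - (l.take j).length = 1 := by rw [htp]; omega
        rw [List.take_append, h1, h2]
        simp
      rw [hdrop', htake', ← hj1, hdropj, pvZero_cons, if_pos hx, List.count_cons]
      simp only [Prod.mk.injEq, List.append_assoc, List.singleton_append]
      refine ⟨?_, trivial⟩
      simp [hx]
      ring
    · have hstep : pvStepB X (c, l) (-((k + 1 : Nat) : Int)) = (c, l) := by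
        simp only [pvStepB, hget, if_neg hx]
      rw [hstep, ih l c (by omega), ← hj1, hdropj, pvZero_cons, if_neg hx, List.count_cons,
        pvTakeSucc l j hjlt]
      simp only [Prod.mk.injEq, List.append_assoc, List.singleton_append]
      refine ⟨?_, trivial⟩
      simp [hx]

-- ===== VERDICT (by name: the statement is the Claim_ definition above) =====
theorem findAndReplaceOccurrences_spec : Claim_equal_findAndReplaceOccurrences := by
  intro X L pos _ hPre
  obtain ⟨hlo, hhi⟩ := hPre
  unfold Spec_findAndReplaceOccurrences findAndReplaceOccurrences findAndReplaceOccurrences_alt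
  rcases le_or_gt 0 pos with h0 | h0
  · rw [pvGoA_nonneg X L ((L.length - pos).toNat + 1) pos h0 hhi (by omega)]
    rw [pvFoldB_nonneg X ((L.length : Int) - pos).toNat L pos 0 h0 hhi rfl]
    simp
  · set k := (-pos).toNat with hk
    have hpos : pos = -(k : Int) := by omega
    have hkle : k ≤ L.length := by omega
    rw [hpos]
    rw [pvGoA_neg X L k (((L.length : Int) - -(k : Int)).toNat + 1) hkle (by omega)]
    rw [PySem.List.pyRange_one_append (-(k : Int)) 0 (L.length : Int) (by omega) (by omega),
      List.foldl_append]
    rw [pvFoldB_neg X k L 0 hkle]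
    set q := L.length - k with hq
    set M := L.take q ++ pvZero X (L.drop q) with hM
    have hMlen : M.length = L.length := by
      simp [hM, pvZero_length]; omega
    have h2 := pvFoldB_nonneg X M.length M 0 (0 + (List.count X (L.drop q) : Int))
      (by omega) (by omega) (by simp)
    rw [← hMlen, h2]
    simp only [Int.toNat_zero, List.drop_zero]
    have hsplit : List.count X L = List.count X (L.take q) + List.count X (L.drop q) := by
      conv_lhs => rw [← List.take_append_drop q L]
      exact List.count_append
    have hMcount : List.count X M = List.count X (L.take q) + List.count X (pvZero X (L.drop q)) := by
      rw [hM]; exact List.count_append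
    rw [pvZero_drop, hsplit, hMcount]
    push_cast
    ring
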